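-- pv_equiv track=rewrite | github.com/retarfi/JFinTEB | src/data/wikipedia.py | cut_template
-- ===== SOURCE A (Python) =====
-- def cut_template(lst: list[str]) -> list[str]:
--     start_index = None
--     for i, line in enumerate(lst):
--         if line.startswith("{{"):
--             start_index = i
--             break
--     assert start_index is not None
--
--     bracket_count = 0
--     for i in range(start_index, len(lst)):
--         line = lst[i]
--         open_brackets = line.count("{{")
--         close_brackets = line.count("}}")
--         bracket_count += open_brackets - close_brackets
--         if bracket_count == 0 and i > start_index:
--             return lst[:start_index] + lst[i + 1 :]
--     raise ValueError("対応する終了位置が見つかりませんでした。")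
-- ===== SOURCE B (Python) =====
-- def cut_template(lst: list[str]) -> list[str]:
--     start = next(i for i, line in enumerate(lst) if line.startswith("{{"))
--     head, body = lst[:start], lst[start:]
--     first_delta = body[0].count("{{") - body[0].count("}}")
--     return head + _after_close(body[1:], first_delta)
--
--
-- def _after_close(lines: list[str], depth: int) -> list[str]:
--     # Structural recursion: consume lines until the template's bracket depth
--     # closes at a line boundary, return everything after that line.
--     if not lines:
--         raise ValueError("対応する終了位置が見つかりませんでした。")
--     d = depth + lines[0].count("{{") - lines[0].count("}}")
--     if d == 0:
--         return lines[1:]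
--     return _after_close(lines[1:], d)
-- ===== Notes on version B (the rewrite author's own statement) =====
-- stated objective: alternative
-- what changed: A's index-based loop over range(start, len) with slicing by indices is replaced by a structural recursion that consumes the list after the opening line and returns the remaining tail when the depth closes, with the prefix prepended; no indices or balance list are maintained.
import Mathlib
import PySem

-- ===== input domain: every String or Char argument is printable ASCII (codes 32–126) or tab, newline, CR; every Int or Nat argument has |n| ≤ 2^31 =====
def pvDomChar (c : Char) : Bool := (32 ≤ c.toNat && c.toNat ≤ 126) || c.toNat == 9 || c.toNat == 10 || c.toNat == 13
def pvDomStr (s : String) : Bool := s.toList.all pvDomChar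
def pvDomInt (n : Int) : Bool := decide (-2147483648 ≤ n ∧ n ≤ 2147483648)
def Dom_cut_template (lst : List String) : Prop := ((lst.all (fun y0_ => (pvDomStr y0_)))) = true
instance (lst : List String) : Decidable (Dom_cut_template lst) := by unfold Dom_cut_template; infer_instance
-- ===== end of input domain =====

-- B replaces A's index loop and index slicing by a structural recursion that
-- consumes the list after the opening line and prepends the prefix; same cost.


-- ===== PORT A =====
-- `for i, line in enumerate(lst): if line.startswith("{{"): start_index = i; break`
def findStartA (lst : List String) (i : Nat) : Option Nat :=
  match lst with
  | [] => none
  | line :: rest =>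
    if PySem.Str.startswith line "{{" then some i else findStartA rest (i + 1)

-- `for i in range(start_index, len(lst)): ...` with the running bracket_count;
-- `lst[:start_index] + lst[i+1:]` with nonnegative indices is exactly take/drop.
def loopA (lst : List String) (start i : Nat) (bc : Int) : List String :=
  if h : i < lst.length then
    let line := lst[i]
    let bc := bc + ((PySem.Str.count line "{{" : Int) - (PySem.Str.count line "}}" : Int))
    if bc = 0 ∧ start < i then lst.take start ++ lst.drop (i + 1)
    else loopA lst start (i + 1) bc
  else []  -- Python raises ValueError here; excluded by Pre_
termination_by lst.length - i

def cut_template (lst : List String) : List String :=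
  match findStartA lst 0 with
  | none => []  -- Python's assert fails here; excluded by Pre_
  | some start => loopA lst start start 0

-- ===== PORT B =====
def deltaB (line : String) : Int :=
  (PySem.Str.count line "{{" : Int) - (PySem.Str.count line "}}" : Int)

-- Source B's `_after_close`: none = its ValueError (propagates to the top)
def afterClose (lines : List String) (depth : Int) : Option (List String) :=
  match lines with
  | [] => none
  | line :: rest =>
    let d := depth + deltaB line
    if d = 0 then some rest else afterClose rest d

def cut_template_alt (lst : List String) : List String :=
  match lst.findIdx? (fun line => PySem.Str.startswith line "{{") with
  | none => []  -- Source B's `next` raises StopIteration here; excluded by Pre_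
  | some start =>
    match lst.drop start with
    | [] => []  -- unreachable: findIdx? gives an in-range index
    | b0 :: brest =>
      match afterClose brest (deltaB b0) with
      | none => []  -- Source B's ValueError; excluded by Pre_
      | some tail => lst.take start ++ tail

-- ===== PRECONDITION & SPEC =====
-- Pre_ excludes exactly the inputs where Python A raises: no line starts with "{{"
-- (AssertionError), or the bracket balance never returns to zero strictly after the
-- start line (ValueError).  B raises on the same inputs.
def Pre_cut_template (lst : List String) : Prop :=
  ∃ s, s < lst.length ∧
    lst.findIdx? (fun line => PySem.Str.startswith line "{{") = some s ∧
    ∃ i, i < lst.length ∧ s < i ∧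
      (((lst.drop s).take (i - s + 1)).map deltaB).sum = 0
instance (lst : List String) : Decidable (Pre_cut_template lst) := by
  unfold Pre_cut_template; infer_instance

def pvWitness_cut_template : List String := ["{{a", "b}}", "c"]

def Spec_cut_template (lst : List String) (out : List String) : Prop := out = cut_template_alt lst
instance (lst : List String) (out : List String) : Decidable (Spec_cut_template lst out) := by unfold Spec_cut_template; infer_instance

-- ===== CLAIM (what is proved, stated in full; the proofs are below) =====
def Claim_equal_cut_template : Prop := ∀ (lst : List String), Dom_cut_template lst → Pre_cut_template lst → Spec_cut_template lst (cut_template lst)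

-- ===== LEMMAS AND PROOFS =====

theorem findStartA_eq (lst : List String) (i : Nat) :
    findStartA lst i =
      (lst.findIdx? (fun line => PySem.Str.startswith line "{{")).map (· + i) := by
  induction lst generalizing i with
  | nil => simp [findStartA]
  | cons line rest ih =>
    simp only [findStartA, List.findIdx?_cons]
    split
    · simp
    · rw [ih, Option.map_map]
      cases List.findIdx? (fun line => PySem.Str.startswith line "{{") rest
      · simp
      · simp; omega

-- A's scan strictly past the start line computes exactly B's `afterClose`
theorem loopA_eq (lst : List String) (s : Nat) :
    ∀ (i : Nat) (bc : Int), s < i →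
      loopA lst s i bc =
        match afterClose (lst.drop i) bc with
        | none => []
        | some tail => lst.take s ++ tail := by
  intro i
  induction hn : lst.length - i using Nat.strong_induction_on generalizing i with
  | _ n ih =>
    intro bc hsi
    rw [loopA]
    by_cases h : i < lst.length
    · rw [List.drop_eq_getElem_cons h]
      simp only [h, dif_pos, afterClose, deltaB]
      by_cases hc : bc + ((PySem.Str.count lst[i] "{{" : Int) - (PySem.Str.count lst[i] "}}" : Int)) = 0
      · rw [if_pos ⟨hc, hsi⟩, if_pos hc]
      · rw [if_neg (fun hx => hc hx.1), if_neg hc]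
        exact ih (lst.length - (i + 1)) (by omega) (i + 1) (by omega) _ (by omega)
    · simp only [h, dif_neg, not_false_iff]
      rw [List.drop_eq_nil_of_le (by omega)]
      simp [afterClose]

-- ===== VERDICT (by name: the statement is the Claim_ definition above) =====
theorem cut_template_spec : Claim_equal_cut_template := by
  intro lst _dom _pre
  unfold Spec_cut_template cut_template cut_template_alt
  rw [findStartA_eq]
  cases hs : lst.findIdx? (fun line => PySem.Str.startswith line "{{") with
  | none => simp
  | some s =>
    simp only [Option.map_some, Nat.add_zero]
    rw [loopA]
    by_cases h : s < lst.length
    · rw [List.drop_eq_getElem_cons h]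
      simp only [h, dif_pos, if_neg (fun hx : _ ∧ s < s => lt_irrefl s hx.2)]
      rw [loopA_eq lst s (s + 1) _ (Nat.lt_succ_self s)]
      simp [deltaB]
    · simp only [h, dif_neg, not_false_iff]
      rw [List.drop_eq_nil_of_le (by omega)]
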